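-- pv_equiv track=rewrite | github.com/MPD12340/100-Python-Projects | hash_functions.py | simpleHash
-- ===== SOURCE A (Python) =====
-- def simpleHash(key):
--     """A simple hashing function."""
--     if isinstance(key, int):  # Integers hash to themselves
--         return key
--     elif isinstance(key, str):  # Strings are hashed by letters
--         return sum(
--             # Multiply the code for each letter by
--             256 ** i * ord(key[i])  # 256 to the power of its position
--             for i in range(len(key)))  # in the string
--     elif isinstance(key, (list, tuple)):  # For sequences,
--         return sum(
--             # Multiply the simpleHash of each element
--             256 ** i * simpleHash(key[i])  # by 256 to the power of its
--             for i in range(len(key)))  # position in the sequence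
--     raise Exception(
--         'Unable to hash key of type ' + str(type(key)))
-- ===== SOURCE B (Python) =====
-- def simpleHash(key):
--     """A simple hashing function (Horner-style, one multiplication per element)."""
--     if isinstance(key, int):
--         return key
--     elif isinstance(key, str):
--         h = 0
--         for ch in reversed(key):
--             h = h * 256 + ord(ch)
--         return h
--     elif isinstance(key, (list, tuple)):
--         h = 0
--         for x in reversed(key):
--             h = h * 256 + simpleHash(x)
--         return h
--     raise Exception(
--         'Unable to hash key of type ' + str(type(key)))
-- ===== Notes on version B (the rewrite author's own statement) =====
-- stated objective: faster
-- what changed: Replaces the positional sum that recomputes 256**i for every index with a single right-to-left Horner pass maintaining one accumulator (h = h*256 + ord(ch)).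
import Mathlib
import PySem

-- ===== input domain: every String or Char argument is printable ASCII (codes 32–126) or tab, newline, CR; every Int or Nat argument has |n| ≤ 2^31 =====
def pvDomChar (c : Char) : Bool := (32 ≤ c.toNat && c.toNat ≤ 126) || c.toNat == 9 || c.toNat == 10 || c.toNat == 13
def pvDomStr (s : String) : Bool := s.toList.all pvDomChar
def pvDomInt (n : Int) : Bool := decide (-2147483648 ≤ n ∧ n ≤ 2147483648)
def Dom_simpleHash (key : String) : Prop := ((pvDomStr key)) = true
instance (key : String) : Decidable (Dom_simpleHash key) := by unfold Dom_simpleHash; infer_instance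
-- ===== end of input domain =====

-- B replaces A's per-position 256**i powers by one right-to-left Horner pass; equality proved on all strings.

-- ===== PORT A =====
-- sum(256 ** i * ord(key[i]) for i in range(len(key)))
def simpleHash (key : String) : Int :=
  ((PySem.List.pyRange 0 (key.toList.length : Int) 1).map
    (fun i => (256 : Int) ^ i.toNat * ((PySem.List.pyGetD key.toList i ' ').toNat : Int))).sum

-- ===== PORT B =====
-- h = 0; for ch in reversed(key): h = h * 256 + ord(ch)
def simpleHash_alt (key : String) : Int :=
  key.toList.reverse.foldl (fun h c => h * 256 + (c.toNat : Int)) 0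

-- ===== PRECONDITION & SPEC =====
def Spec_simpleHash (key : String) (out : Int) : Prop := out = simpleHash_alt key
instance (key : String) (out : Int) : Decidable (Spec_simpleHash key out) := by unfold Spec_simpleHash; infer_instance

-- ===== CLAIM (what is proved, stated in full; the proofs are below) =====
def Claim_equal_simpleHash : Prop := ∀ (key : String), Dom_simpleHash key → Spec_simpleHash key (simpleHash key)

-- ===== LEMMAS AND PROOFS =====

-- Horner fold with an arbitrary initial accumulator, split off the initial value.
theorem horner_foldl_init (rl : List Char) (init : Int) :
    rl.foldl (fun h c => h * 256 + (c.toNat : Int)) init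
      = init * 256 ^ rl.length + rl.foldl (fun h c => h * 256 + (c.toNat : Int)) 0 := by
  induction rl generalizing init with
  | nil => simp
  | cons c t ih =>
    simp only [List.foldl_cons, List.length_cons]
    rw [ih (init * 256 + (c.toNat : Int)), ih ((0 : Int) * 256 + (c.toNat : Int))]
    ring

-- Positional power sum = Horner on the reversed list.
theorem sum_eq_horner (l : List Char) :
    ((PySem.List.pyRange 0 (l.length : Int) 1).map
      (fun i => (256 : Int) ^ i.toNat * ((PySem.List.pyGetD l i ' ').toNat : Int))).sum
      = l.reverse.foldl (fun h c => h * 256 + (c.toNat : Int)) 0 := by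
  induction l using List.reverseRecOn with
  | nil => simp [PySem.List.pyRange]
  | append_singleton l c ih =>
    have hlen : ((l ++ [c]).length : Int) = (l.length : Int) + 1 := by
      simp
    rw [hlen, PySem.List.pyRange_one_succ_right (a := 0) (b := (l.length : Int)) (by positivity),
      List.map_append, List.sum_append]
    have hmap : ∀ i ∈ PySem.List.pyRange 0 (l.length : Int) 1,
        (256 : Int) ^ i.toNat * ((PySem.List.pyGetD (l ++ [c]) i ' ').toNat : Int)
          = (256 : Int) ^ i.toNat * ((PySem.List.pyGetD l i ' ').toNat : Int) := by
      intro i hi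
      rw [PySem.List.mem_pyRange_one] at hi
      obtain ⟨k, rfl⟩ := Int.eq_ofNat_of_zero_le hi.1
      have hk : k < l.length := by exact_mod_cast hi.2
      rw [PySem.List.pyGetD_natCast, PySem.List.pyGetD_natCast,
        List.getD_append _ _ _ _ hk]
    rw [List.map_congr_left hmap, ih, List.reverse_append]
    simp only [List.reverse_singleton, List.singleton_append, List.foldl_cons]
    rw [horner_foldl_init l.reverse ((0 : Int) * 256 + (c.toNat : Int))]
    simp only [List.length_reverse, List.map_singleton, List.sum_singleton]
    have : PySem.List.pyGetD (l ++ [c]) ((l.length : Int)) ' ' = c := by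
      rw [PySem.List.pyGetD_natCast]
      simp
    rw [this, Int.toNat_natCast]
    ring

-- ===== VERDICT (by name: the statement is the Claim_ definition above) =====
theorem simpleHash_spec : Claim_equal_simpleHash := by
  intro key _
  unfold Spec_simpleHash simpleHash simpleHash_alt
  exact sum_eq_horner key.toList
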